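-- pv_equiv track=rewrite | github.com/Ayushi592Vam/Document-signal-hub-v3 | modules/parsing.py | _merge_two_header_rows
-- ===== SOURCE A (Python) =====
-- def _merge_two_header_rows(row1: list, row2: list) -> list[str]:
--     """
--     Combine a group-label row and a sub-label row into one list of column names.
--     Duplicate merged names get a numeric suffix (_2, _3 …).
--     """
--     headers: list[str] = []
--     seen: dict[str, int] = {}
--     for g, s in zip(row1, row2):
--         g_s = str(g).strip() if g else ""
--         s_s = str(s).strip() if s else ""
--         if g_s and s_s and g_s.upper() != s_s.upper():
--             name = f"{g_s} {s_s}"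
--         elif s_s:
--             name = s_s
--         elif g_s:
--             name = g_s
--         else:
--             name = ""
--         if name:
--             seen[name] = seen.get(name, 0) + 1
--             if seen[name] > 1:
--                 name = f"{name}_{seen[name]}"
--         headers.append(name)
--     return headers
-- ===== SOURCE B (Python) =====
-- def _merge_two_header_rows(row1: list, row2: list) -> list[str]:
--     """
--     Combine a group-label row and a sub-label row into one list of column names.
--     Three stages: build the merged base names; group the positions of each
--     non-empty name into an index dict in one pass; then, per name, overwrite the
--     second and later occurrence slots with suffixed names by random-access writes.
--     """
--     bases = []
--     for g, s in zip(row1, row2):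
--         g_s = str(g).strip() if g else ""
--         s_s = str(s).strip() if s else ""
--         if g_s and s_s and g_s.upper() != s_s.upper():
--             bases.append(f"{g_s} {s_s}")
--         elif s_s:
--             bases.append(s_s)
--         else:
--             bases.append(g_s)
--     positions = {}
--     for i, name in enumerate(bases):
--         if name:
--             positions.setdefault(name, []).append(i)
--     out = list(bases)
--     for name, idxs in positions.items():
--         for k, i in enumerate(idxs[1:], start=2):
--             out[i] = f"{name}_{k}"
--     return out
-- ===== Notes on version B (the rewrite author's own statement) =====
-- stated objective: alternative
-- what changed: A suffixes duplicates during its single pass with a running seen-counter dict consulted at every element; B instead groups the positions of each non-empty base name into a name->index-list dict and then, per group, overwrites the second and later occurrence slots in the output by random-access index writes, never maintaining a running count.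
import Mathlib
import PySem

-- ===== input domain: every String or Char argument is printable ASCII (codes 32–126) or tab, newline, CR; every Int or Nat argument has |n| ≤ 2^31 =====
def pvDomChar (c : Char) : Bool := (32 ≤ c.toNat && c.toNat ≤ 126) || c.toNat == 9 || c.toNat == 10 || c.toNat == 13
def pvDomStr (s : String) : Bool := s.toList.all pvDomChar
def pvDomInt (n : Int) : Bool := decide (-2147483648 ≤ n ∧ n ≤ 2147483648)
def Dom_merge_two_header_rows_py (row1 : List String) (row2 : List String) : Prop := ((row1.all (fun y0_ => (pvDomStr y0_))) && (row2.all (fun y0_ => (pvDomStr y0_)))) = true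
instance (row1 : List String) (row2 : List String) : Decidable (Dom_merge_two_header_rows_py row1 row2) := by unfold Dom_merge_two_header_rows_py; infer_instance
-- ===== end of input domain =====

-- B replaces A's single pass with its running seen-counter dict by three stages: build the base
-- names, group the positions of each non-empty name into a name → index-list dict, then per name
-- overwrite the 2nd-and-later occurrence slots by random-access index writes (objective: alternative).

-- ===== PORT A =====
-- one loop over zip(row1,row2); state = (headers so far, seen-counter dict)
def merge_two_header_rows_py (row1 : List String) (row2 : List String) : List String :=
  ((row1.zip row2).foldl
    (fun (acc : List String × PySem.Dict String Int) p =>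
      let g_s := if p.1 ≠ "" then PySem.Str.strip p.1 else ""
      let s_s := if p.2 ≠ "" then PySem.Str.strip p.2 else ""
      let name :=
        if g_s ≠ "" ∧ s_s ≠ "" ∧ PySem.Str.upper g_s ≠ PySem.Str.upper s_s then g_s ++ " " ++ s_s
        else if s_s ≠ "" then s_s
        else if g_s ≠ "" then g_s
        else ""
      if name ≠ "" then
        let seen' := acc.2.insert name (acc.2.getD name 0 + 1)
        let cnt := seen'.getD name 0
        (acc.1 ++ [if cnt > 1 then name ++ "_" ++ PySem.Int.toStr cnt else name], seen')
      else
        (acc.1 ++ [name], acc.2))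
    ([], PySem.Dict.empty)).1

-- ===== PORT B =====
-- base name of one column (B's first loop body): join when both present and differ
-- case-insensitively, else the sub-label, else the group label (empty when both empty)
def pvBaseName (g : String) (s : String) : String :=
  let g_s := if g ≠ "" then PySem.Str.strip g else ""
  let s_s := if s ≠ "" then PySem.Str.strip s else ""
  if g_s ≠ "" ∧ s_s ≠ "" ∧ PySem.Str.upper g_s ≠ PySem.Str.upper s_s then g_s ++ " " ++ s_s
  else if s_s ≠ "" then s_s
  else g_s

def merge_two_header_rows_py_alt (row1 : List String) (row2 : List String) : List String :=
  let bases := (row1.zip row2).foldl (fun acc p => acc ++ [pvBaseName p.1 p.2]) []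
  let positions := (PySem.List.enumerate bases).foldl
      (fun d q => if q.2 ≠ "" then d.modify q.2 [] (· ++ [q.1]) else d)
      (PySem.Dict.empty : PySem.Dict String (List Int))
  positions.items.foldl
    (fun out p =>
      (PySem.List.enumerate (PySem.List.slice p.2 (some 1) none) 2).foldl
        (fun out q => PySem.List.pySetD out q.2 (p.1 ++ "_" ++ PySem.Int.toStr q.1)) out)
    bases

-- ===== PRECONDITION & SPEC =====
def Spec_merge_two_header_rows_py (row1 : List String) (row2 : List String) (out : List String) : Prop := out = merge_two_header_rows_py_alt row1 row2
instance (row1 : List String) (row2 : List String) (out : List String) : Decidable (Spec_merge_two_header_rows_py row1 row2 out) := by unfold Spec_merge_two_header_rows_py; infer_instance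

-- ===== CLAIM (what is proved, stated in full; the proofs are below) =====
def Claim_equal_merge_two_header_rows_py : Prop := ∀ (row1 : List String) (row2 : List String), Dom_merge_two_header_rows_py row1 row2 → Spec_merge_two_header_rows_py row1 row2 (merge_two_header_rows_py row1 row2)

-- ===== LEMMAS AND PROOFS =====

-- occurrence number of position j's base name within bases[0..j]
def pvRank (bases : List String) (j : Nat) : Nat := (bases.take (j+1)).count (bases.getD j "")

-- A's per-element step, expressed on an already-computed base name
def pvDStep (acc : List String × PySem.Dict String Int) (name : String) : List String × PySem.Dict String Int :=
  if name ≠ "" then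
    let seen' := acc.2.insert name (acc.2.getD name 0 + 1)
    let cnt := seen'.getD name 0
    (acc.1 ++ [if cnt > 1 then name ++ "_" ++ PySem.Int.toStr cnt else name], seen')
  else
    (acc.1 ++ [name], acc.2)

-- reference renderer: walks the base names with the explicit prefix p already emitted
def pvRender (p : List String) : List String → List String
  | [] => []
  | n :: t =>
      (if n = "" then n
       else if (List.count n p : Int) + 1 > 1 then n ++ "_" ++ PySem.Int.toStr ((List.count n p : Int) + 1)
       else n) :: pvRender (p ++ [n]) t

-- the value rendered at one position given the emitted prefix
def pvF (pre : List String) (n : String) : String :=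
  if n = "" then n
  else if (List.count n pre : Int) + 1 > 1 then n ++ "_" ++ PySem.Int.toStr ((List.count n pre : Int) + 1)
  else n

-- positions (as Nats) at which bases carries name k
def pvP (bases : List String) (k : String) : List Nat :=
  (List.range bases.length).filter (fun t => bases.getD t "" == k)

theorem pvName_eq (g_s s_s : String) :
    (if g_s ≠ "" ∧ s_s ≠ "" ∧ PySem.Str.upper g_s ≠ PySem.Str.upper s_s then g_s ++ " " ++ s_s
     else if s_s ≠ "" then s_s else if g_s ≠ "" then g_s else "") =
    (if g_s ≠ "" ∧ s_s ≠ "" ∧ PySem.Str.upper g_s ≠ PySem.Str.upper s_s then g_s ++ " " ++ s_s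
     else if s_s ≠ "" then s_s else g_s) := by
  by_cases h1 : g_s ≠ "" ∧ s_s ≠ "" ∧ PySem.Str.upper g_s ≠ PySem.Str.upper s_s
  · simp [h1]
  · by_cases h2 : s_s ≠ ""
    · simp [h2]
    · by_cases h3 : g_s ≠ "" <;> simp_all

theorem pvA_eq_fold_dstep (row1 row2 : List String) :
    merge_two_header_rows_py row1 row2 =
      (((row1.zip row2).map (fun p => pvBaseName p.1 p.2)).foldl pvDStep ([], PySem.Dict.empty)).1 := by
  unfold merge_two_header_rows_py
  rw [List.foldl_map]
  congr 1
  apply PySem.List.foldl_congr_mem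
  intro acc p _
  simp only [pvDStep, pvBaseName]
  rw [pvName_eq]

theorem pvFold_dstep_eq_render (l : List String) (out : List String)
    (seen : PySem.Dict String Int) (p : List String)
    (hinv : ∀ n, n ≠ "" → seen.getD n 0 = (List.count n p : Int)) :
    (l.foldl pvDStep (out, seen)).1 = out ++ pvRender p l := by
  induction l generalizing out seen p with
  | nil => simp [pvRender]
  | cons n t ih =>
      simp only [List.foldl_cons, pvRender]
      by_cases hn : n = ""
      · subst hn
        have hstep : pvDStep (out, seen) "" = (out ++ [""], seen) := by
          simp [pvDStep]
        rw [hstep, ih (out ++ [""]) seen (p ++ [""]) ?_, List.append_assoc]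
        · simp
        · intro m hm
          rw [hinv m hm, List.count_append]
          simp [Ne.symm hm]
      · have hc : seen.getD n 0 = (List.count n p : Int) := hinv n hn
        have hstep : pvDStep (out, seen) n =
            (out ++ [if ((List.count n p : Int) + 1) > 1 then n ++ "_" ++ PySem.Int.toStr ((List.count n p : Int) + 1) else n],
             seen.insert n ((List.count n p : Int) + 1)) := by
          simp [pvDStep, hn, hc]
        rw [hstep, ih _ _ (p ++ [n]) ?_, List.append_assoc]
        · simp [hn]
        · intro m hm
          rw [PySem.Dict.getD_insert, List.count_append]
          by_cases hmn : m = n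
          · subst hmn; simp
          · simp [hmn, hinv m hm, Ne.symm hmn]

theorem pvRender_length (p l : List String) : (pvRender p l).length = l.length := by
  induction l generalizing p with
  | nil => simp [pvRender]
  | cons n t ih => simp [pvRender, ih]

theorem pvRender_getElem (p l : List String) (i : Nat) (hi : i < l.length) :
    (pvRender p l)[i]'(by rw [pvRender_length]; exact hi) = pvF (p ++ l.take i) (l[i]) := by
  induction l generalizing p i with
  | nil => simp at hi
  | cons n t ih =>
      cases i with
      | zero => simp [pvRender, pvF]
      | succ i =>
          have hi' : i < t.length := by simpa using hi
          simp only [pvRender, List.getElem_cons_succ, List.take_succ_cons]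
          rw [ih (p ++ [n]) i hi']
          simp

-- ---------- counting machinery ----------

theorem pvP_pairwise (bases : List String) (k : String) : (pvP bases k).Pairwise (· < ·) := by
  exact List.Pairwise.filter _ (List.pairwise_lt_range)

theorem pvP_nodup (bases : List String) (k : String) : (pvP bases k).Nodup := by
  exact (pvP_pairwise bases k).imp (fun h => Nat.ne_of_lt h)

theorem pvP_mem (bases : List String) (k : String) (t : Nat) :
    t ∈ pvP bases k ↔ t < bases.length ∧ bases.getD t "" = k := by
  simp [pvP, List.mem_filter, List.mem_range]

theorem pvCountP_lt_succ (Q : List Nat) (m : Nat) (hnd : Q.Nodup) :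
    List.countP (fun t => decide (t < m + 1)) Q
      = List.countP (fun t => decide (t < m)) Q + (if m ∈ Q then 1 else 0) := by
  revert hnd
  induction Q with
  | nil => intro _; simp
  | cons q Q ih =>
      intro hnd
      have hq : q ∉ Q := (List.nodup_cons.mp hnd).1
      have hnd' : Q.Nodup := (List.nodup_cons.mp hnd).2
      rw [List.countP_cons, List.countP_cons, ih hnd']
      by_cases h0 : m = q
      · subst h0
        simp [hq]
      · have hmem : (m ∈ q :: Q) ↔ (m ∈ Q) := by
          rw [List.mem_cons]
          exact ⟨fun h => h.resolve_left (fun h' => h0 h'), Or.inr⟩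
        by_cases hqm : q < m
        · have h2 : q < m + 1 := by omega
          simp only [hqm, h2, decide_true, if_true]
          rw [if_congr hmem rfl rfl]
          omega
        · have h2 : ¬ q < m + 1 := by omega
          simp only [hqm, h2, decide_false, Bool.false_eq_true, if_false]
          rw [if_congr hmem rfl rfl]
          omega

theorem pvFilter_lt_succ (Q : List Nat) (hnd : Q.Nodup) (m : Nat) :
    (Q.filter (fun t => t < m + 1)).length
      = (Q.filter (fun t => t < m)).length + (if m ∈ Q then 1 else 0) := by
  rw [← List.countP_eq_length_filter, ← List.countP_eq_length_filter]
  exact pvCountP_lt_succ Q m hnd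

theorem pvCount_take (bases : List String) (k : String) (m : Nat) (hm : m ≤ bases.length) :
    (bases.take m).count k = ((pvP bases k).filter (fun t => t < m)).length := by
  induction m with
  | zero => simp
  | succ m ih =>
      have hm' : m ≤ bases.length := by omega
      have hlt : m < bases.length := by omega
      have hmem : m ∈ pvP bases k ↔ bases.getD m "" = k := by
        rw [pvP_mem]; exact ⟨fun h => h.2, fun h => ⟨by omega, h⟩⟩
      have hgd : bases.getD m "" = bases[m] := by
        simp [List.getD_eq_getElem?_getD, List.getElem?_eq_getElem hlt]
      rw [pvFilter_lt_succ _ (pvP_nodup bases k) m, ← ih hm', List.take_add_one, List.count_append]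
      by_cases hk : bases[m] = k
      · have h1 : m ∈ pvP bases k := hmem.mpr (by rw [hgd]; exact hk)
        simp [List.getElem?_eq_getElem hlt, hk, h1]
      · have h1 : m ∉ pvP bases k := fun h => hk (by rw [← hgd]; exact hmem.mp h)
        simp [List.getElem?_eq_getElem hlt, hk, h1]

theorem pvRank_at (bases : List String) (k : String) (t : Nat) (ht : t < (pvP bases k).length) :
    (bases.take ((pvP bases k)[t] + 1)).count k = t + 1 := by
  have hjlen : (pvP bases k)[t] < bases.length :=
    ((pvP_mem bases k _).mp (List.getElem_mem ht)).1
  rw [pvCount_take bases k _ (by omega)]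
  generalize hx : (pvP bases k)[t] = x
  have hpw := (List.pairwise_iff_getElem).mp (pvP_pairwise bases k)
  have hkey : (pvP bases k).filter (fun a => a < x + 1) = (pvP bases k).take (t + 1) := by
    conv_lhs => rw [← List.take_append_drop (t + 1) (pvP bases k)]
    rw [List.filter_append]
    have h1 : List.filter (fun a => decide (a < x + 1)) ((pvP bases k).take (t + 1))
        = (pvP bases k).take (t + 1) := by
      rw [List.filter_eq_self]
      intro a ha
      obtain ⟨i, hilen, hia⟩ := List.mem_iff_getElem.mp ha
      have hi' : i < t + 1 := by
        have := hilen; simp [List.length_take] at this; omega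
      rw [List.getElem_take] at hia
      simp only [decide_eq_true_eq]
      rcases Nat.lt_or_ge i t with h | h
      · have := hpw i t (by omega) ht h
        rw [hia, hx] at this
        omega
      · have : i = t := by omega
        subst this
        rw [hx] at hia
        omega
    have h2 : List.filter (fun a => decide (a < x + 1)) ((pvP bases k).drop (t + 1))
        = [] := by
      rw [List.filter_eq_nil_iff]
      intro a ha
      obtain ⟨i, hilen, hia⟩ := List.mem_iff_getElem.mp ha
      rw [List.getElem_drop] at hia
      have := hpw t (t + 1 + i) ht (by simp [List.length_drop] at hilen; omega) (by omega)
      rw [hia, hx] at this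
      simp only [decide_eq_true_eq]
      omega
    rw [h1, h2, List.append_nil]
  rw [hkey, List.length_take]
  have : t + 1 ≤ (pvP bases k).length := by omega
  omega

theorem pvRank_of_mem (bases : List String) (k : String) (j : Nat) (hj : j ∈ pvP bases k) :
    pvRank bases j = (pvP bases k).idxOf j + 1 := by
  have ht : (pvP bases k).idxOf j < (pvP bases k).length := List.idxOf_lt_length_of_mem hj
  have hget : (pvP bases k)[(pvP bases k).idxOf j] = j := List.getElem_idxOf ht
  have hgd : bases.getD j "" = k := ((pvP_mem bases k j).mp hj).2
  have := pvRank_at bases k ((pvP bases k).idxOf j) ht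
  rw [hget] at this
  rw [pvRank, hgd, this]

-- ---------- B-side: the positions dict ----------

def pvPositions (bases : List String) : PySem.Dict String (List Int) :=
  (PySem.List.enumerate bases).foldl
    (fun d q => if q.2 ≠ "" then d.modify q.2 [] (· ++ [q.1]) else d)
    (PySem.Dict.empty : PySem.Dict String (List Int))

theorem pvPositions_eq_foldl_swap (bases : List String) :
    pvPositions bases =
      ((((PySem.List.enumerate bases).filter (fun q => q.2 ≠ "")).map Prod.swap).foldl
        (fun d p => d.modify p.1 [] (· ++ [p.2])) PySem.Dict.empty) := by
  unfold pvPositions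
  rw [List.foldl_map, List.foldl_filter]
  apply PySem.List.foldl_congr_mem
  intro d q _
  by_cases h : q.2 = "" <;> simp [h]

theorem pvEnum_idx (l : List String) (k : String) (s : Nat) :
    (((PySem.List.enumerate l (s : Int)).filter (fun q => q.2 == k)).map (fun q => q.1))
      = ((List.range l.length).filter (fun t => l.getD t "" == k)).map (fun t => ((s + t : Nat) : Int)) := by
  induction l generalizing s with
  | nil => simp [PySem.List.enumerate]
  | cons x tl ih =>
      have hcast : (s : Int) + 1 = ((s + 1 : Nat) : Int) := by omega
      have htail : List.filter (fun t => (x :: tl).getD t "" == k) ((List.range tl.length).map Nat.succ)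
          = ((List.range tl.length).filter (fun t => tl.getD t "" == k)).map Nat.succ := by
        rw [List.filter_map]
        congr 1
      rw [PySem.List.enumerate_cons]
      have hlen : List.range (x :: tl).length = 0 :: (List.range tl.length).map Nat.succ :=
        List.range_succ_eq_map
      rw [hlen]
      simp only [List.filter_cons, List.getD_cons_zero]
      rw [htail]
      by_cases hx : (x == k) = true
      · simp only [hx, if_true, List.map_cons, List.map_map]
        rw [hcast, ih (s + 1), List.cons.injEq]
        refine ⟨by norm_num, ?_⟩
        apply List.map_congr_left
        intro t _
        simp only [Function.comp_apply, Nat.succ_eq_add_one]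
        push_cast
        omega
      · simp only [hx, Bool.false_eq_true, if_false, List.map_map]
        rw [hcast, ih (s + 1)]
        apply List.map_congr_left
        intro t _
        simp only [Function.comp_apply, Nat.succ_eq_add_one]
        push_cast
        omega

theorem pvPositions_getD (bases : List String) (k : String) (hk : k ≠ "") :
    (pvPositions bases).getD k [] = (pvP bases k).map (fun t : Nat => (t : Int)) := by
  rw [pvPositions_eq_foldl_swap, PySem.Dict.getD_foldl_modify_append,
    PySem.Dict.getD_empty, List.nil_append]
  rw [List.filter_map, List.map_map]
  have hpred : (fun q : Int × String => ((fun p : String × Int => p.1 == k) ∘ Prod.swap) q)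
      = (fun q : Int × String => q.2 == k) := by
    funext q; simp
  have hcomp : ((fun p : String × Int => p.2) ∘ Prod.swap)
      = (fun q : Int × String => q.1) := by
    funext q; simp
  rw [List.filter_filter]
  have hff : (fun q : Int × String => ((fun p : String × Int => p.1 == k) ∘ Prod.swap) q && decide (q.2 ≠ ""))
      = (fun q : Int × String => q.2 == k) := by
    funext q
    by_cases h : q.2 = k
    · simp [h, hk]
    · simp [h]
  rw [hff, hcomp]
  have := pvEnum_idx bases k 0
  simp only [Nat.cast_zero, Nat.zero_add] at this
  rw [this]
  simp [pvP]

theorem pvPositions_keys_nodup (bases : List String) : (pvPositions bases).keys.Nodup := by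
  rw [pvPositions_eq_foldl_swap]
  exact PySem.Dict.nodup_keys_foldl_modify_key _ _ _ _ _ (by simp [PySem.Dict.keys_empty])

theorem pvPositions_keys_mem_iff (bases : List String) (n : String) :
    n ∈ (pvPositions bases).keys
      ↔ n ∈ (((PySem.List.enumerate bases).filter (fun q => q.2 ≠ "")).map (fun q => q.2)) := by
  rw [pvPositions_eq_foldl_swap, PySem.Dict.keys_foldl_modify_key]
  rw [List.map_map]
  have : ((Prod.fst ∘ Prod.swap : Int × String → String))
      = (fun q : Int × String => q.2) := by funext q; simp
  rw [this]
  rw [PySem.Set.mem_update]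
  simp [PySem.Dict.keys_empty]

theorem pvPositions_keys_ne (bases : List String) :
    ∀ k ∈ (pvPositions bases).keys, k ≠ "" := by
  intro k hk
  rw [pvPositions_keys_mem_iff] at hk
  obtain ⟨q, hq, hq2⟩ := List.mem_map.mp hk
  have := (List.mem_filter.mp hq).2
  simp only [decide_eq_true_eq] at this
  rw [← hq2]
  exact this

theorem pvPositions_mem_keys (bases : List String) (n : String) (hn : n ≠ "") (hmem : n ∈ bases) :
    n ∈ (pvPositions bases).keys := by
  rw [pvPositions_keys_mem_iff]
  have : n ∈ (PySem.List.enumerate bases 0).map (fun q => q.2) := by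
    rw [PySem.List.map_snd_enumerate]; exact hmem
  obtain ⟨q, hq, hq2⟩ := List.mem_map.mp this
  exact List.mem_map.mpr ⟨q, List.mem_filter.mpr ⟨hq, by simp [hq2, hn]⟩, hq2⟩

-- ---------- B-side: the write-back loop ----------

-- the inner loop of B's third stage for one dict item (k, idxs)
def pvWrite (out : List String) (k : String) (idxs : List Int) : List String :=
  (PySem.List.enumerate (PySem.List.slice idxs (some 1) none) 2).foldl
    (fun out q => PySem.List.pySetD out q.2 (k ++ "_" ++ PySem.Int.toStr q.1)) out

theorem pvEnumerate_map {α β : Type} (f : α → β) (l : List α) (s : Int) :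
    PySem.List.enumerate (l.map f) s = (PySem.List.enumerate l s).map (fun q => (q.1, f q.2)) := by
  induction l generalizing s with
  | nil => simp [PySem.List.enumerate]
  | cons x tl ih => rw [List.map_cons, PySem.List.enumerate_cons, PySem.List.enumerate_cons, ih]; simp

theorem pvSetFold (Q : List Nat) (v : Int → String) :
    ∀ (out : List String) (s : Int), Q.Nodup → (∀ t ∈ Q, t < out.length) → ∀ (j : Nat),
    ((PySem.List.enumerate Q s).foldl (fun o q => o.set q.2 (v q.1)) out)[j]?
      = if j ∈ Q then some (v (s + Q.idxOf j)) else out[j]? := by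
  induction Q with
  | nil => intro out s _ _ j; simp [PySem.List.enumerate]
  | cons q Q ih =>
      intro out s hnd hQ j
      have hq : q ∉ Q := (List.nodup_cons.mp hnd).1
      have hnd' : Q.Nodup := (List.nodup_cons.mp hnd).2
      rw [PySem.List.enumerate_cons, List.foldl_cons]
      rw [ih (out.set q (v s)) (s + 1) hnd'
        (by intro t ht; rw [List.length_set]; exact hQ t (List.mem_cons_of_mem _ ht)) j]
      by_cases hjQ : j ∈ Q
      · have hjq : j ≠ q := fun h => hq (h ▸ hjQ)
        have hmem : j ∈ q :: Q := List.mem_cons_of_mem _ hjQ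
        have hidx : (q :: Q).idxOf j = Q.idxOf j + 1 := by
          rw [List.idxOf_cons]
          simp [show (q == j) = false by simp [Ne.symm hjq]]
        rw [if_pos hjQ, if_pos hmem, hidx]
        congr 2
        push_cast
        omega
      · by_cases hjq : j = q
        · subst hjq
          have hlt : j < out.length := hQ j List.mem_cons_self
          rw [if_neg hjQ, List.getElem?_set_self hlt, if_pos List.mem_cons_self]
          have hidx : (j :: Q).idxOf j = 0 := by rw [List.idxOf_cons]; simp
          rw [hidx]
          norm_num
        · have hmem : j ∉ q :: Q := by
            simp [List.mem_cons, hjq, hjQ]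
          rw [if_neg hjQ, if_neg hmem]
          exact List.getElem?_set_ne (fun h => hjq h.symm)

theorem pvWrite_length (out : List String) (k : String) (idxs : List Int) :
    (pvWrite out k idxs).length = out.length := by
  unfold pvWrite
  induction (PySem.List.enumerate (PySem.List.slice idxs (some 1) none) 2) generalizing out with
  | nil => rfl
  | cons x L ih => rw [List.foldl_cons, ih, PySem.List.length_pySetD]

theorem pvWrite_getElem? (bases out : List String) (k : String) (_hk : k ≠ "")
    (hlen : out.length = bases.length) (j : Nat) (hj : j < bases.length) :
    (pvWrite out k ((pvP bases k).map (fun t : Nat => (t : Int))))[j]?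
      = if bases.getD j "" = k ∧ 2 ≤ pvRank bases j
        then some (k ++ "_" ++ PySem.Int.toStr (pvRank bases j : Int))
        else out[j]? := by
  have hnodup := pvP_nodup bases k
  rcases hP : pvP bases k with _ | ⟨p0, rest⟩
  · have hcond : ¬ (bases.getD j "" = k ∧ 2 ≤ pvRank bases j) := by
      rintro ⟨h1, _⟩
      have : j ∈ pvP bases k := (pvP_mem bases k j).mpr ⟨hj, h1⟩
      rw [hP] at this
      simp at this
    rw [if_neg hcond]
    unfold pvWrite
    rw [List.map_nil, PySem.List.slice_from_one]
    simp
  · rw [hP] at hnodup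
    have hp0 : p0 ∉ rest := (List.nodup_cons.mp hnodup).1
    have hrest : rest.Nodup := (List.nodup_cons.mp hnodup).2
    unfold pvWrite
    rw [List.map_cons, PySem.List.slice_from_one, List.tail_cons]
    rw [pvEnumerate_map, List.foldl_map]
    have hfun : (fun (o : List String) (q : Int × Nat) =>
          PySem.List.pySetD o (((q.1, (q.2 : Int))).2) (k ++ "_" ++ PySem.Int.toStr ((q.1, (q.2 : Int))).1))
        = (fun (o : List String) (q : Int × Nat) => o.set q.2 ((fun i => k ++ "_" ++ PySem.Int.toStr i) q.1)) := by
      funext o q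
      rw [PySem.List.pySetD_natCast]
    rw [hfun]
    rw [pvSetFold rest (fun i => k ++ "_" ++ PySem.Int.toStr i) out 2 hrest
      (by
        intro t ht
        have h1 : t ∈ pvP bases k := by rw [hP]; exact List.mem_cons_of_mem _ ht
        have h2 := ((pvP_mem bases k t).mp h1).1
        omega) j]
    by_cases hin : j ∈ rest
    · have hjP : j ∈ pvP bases k := by rw [hP]; exact List.mem_cons_of_mem _ hin
      have hgd : bases.getD j "" = k := ((pvP_mem bases k j).mp hjP).2
      have hjp0 : j ≠ p0 := fun h => hp0 (h ▸ hin)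
      have hidx : (pvP bases k).idxOf j = rest.idxOf j + 1 := by
        rw [hP, List.idxOf_cons]
        simp [show (p0 == j) = false by simp [Ne.symm hjp0]]
      have hrank : pvRank bases j = rest.idxOf j + 2 := by
        rw [pvRank_of_mem bases k j hjP, hidx]
      rw [if_pos hin]
      have hc2 : bases.getD j "" = k ∧ 2 ≤ pvRank bases j := ⟨hgd, by omega⟩
      rw [if_pos hc2, hrank]
      congr 2
      push_cast
      ring
    · rw [if_neg hin]
      have hcond : ¬ (bases.getD j "" = k ∧ 2 ≤ pvRank bases j) := by
        rintro ⟨h1, h2⟩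
        have hjP : j ∈ pvP bases k := (pvP_mem bases k j).mpr ⟨hj, h1⟩
        have hrank := pvRank_of_mem bases k j hjP
        have hidxpos : 1 ≤ (pvP bases k).idxOf j := by omega
        rw [hP] at hjP
        rcases List.mem_cons.mp hjP with h | h
        · subst h
          rw [hP, List.idxOf_cons] at hidxpos
          simp at hidxpos
        · exact hin h
      rw [if_neg hcond]

-- outer fold over a list of keys
theorem pvApply_getElem? (bases : List String) (kl : List String)
    (hne : ∀ k ∈ kl, k ≠ "") (out : List String) (hlen : out.length = bases.length)
    (j : Nat) (hj : j < bases.length) :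
    ((kl.foldl (fun out k => pvWrite out k ((pvPositions bases).getD k [])) out))[j]?
      = if bases.getD j "" ∈ kl ∧ 2 ≤ pvRank bases j
        then some (bases.getD j "" ++ "_" ++ PySem.Int.toStr (pvRank bases j : Int))
        else out[j]? := by
  induction kl generalizing out with
  | nil => simp
  | cons k kl ih =>
      have hkne : k ≠ "" := hne k List.mem_cons_self
      rw [List.foldl_cons]
      rw [ih (fun k' hk' => hne k' (List.mem_cons_of_mem _ hk'))
        (pvWrite out k ((pvPositions bases).getD k []))
        (by rw [pvWrite_length]; exact hlen)]
      rw [pvPositions_getD bases k hkne, pvWrite_getElem? bases out k hkne hlen j hj]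
      by_cases h1 : bases.getD j "" ∈ kl ∧ 2 ≤ pvRank bases j
      · have hc : bases.getD j "" ∈ k :: kl ∧ 2 ≤ pvRank bases j :=
          ⟨List.mem_cons_of_mem _ h1.1, h1.2⟩
        rw [if_pos h1, if_pos hc]
      · rw [if_neg h1]
        by_cases h2 : bases.getD j "" = k ∧ 2 ≤ pvRank bases j
        · have hc : bases.getD j "" ∈ k :: kl ∧ 2 ≤ pvRank bases j :=
            ⟨by rw [h2.1]; exact List.mem_cons_self, h2.2⟩
          rw [if_pos h2, if_pos hc, h2.1]
        · have hc : ¬ (bases.getD j "" ∈ k :: kl ∧ 2 ≤ pvRank bases j) := by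
            rintro ⟨hm, hr⟩
            rcases List.mem_cons.mp hm with h | h
            · exact h2 ⟨h, hr⟩
            · exact h1 ⟨h, hr⟩
          rw [if_neg h2, if_neg hc]

theorem pvApply_length (bases : List String) (kl : List String) (out : List String) :
    ((kl.foldl (fun out k => pvWrite out k ((pvPositions bases).getD k [])) out)).length
      = out.length := by
  induction kl generalizing out with
  | nil => rfl
  | cons k kl ih => rw [List.foldl_cons, ih, pvWrite_length]

theorem pvB_eq (row1 row2 : List String) :
    merge_two_header_rows_py_alt row1 row2 =
      ((pvPositions ((row1.zip row2).map (fun p => pvBaseName p.1 p.2))).keys).foldl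
        (fun out k => pvWrite out k ((pvPositions ((row1.zip row2).map (fun p => pvBaseName p.1 p.2))).getD k []))
        ((row1.zip row2).map (fun p => pvBaseName p.1 p.2)) := by
  simp only [merge_two_header_rows_py_alt]
  rw [PySem.List.foldl_append_singleton_eq_map, List.nil_append]
  have hpos : (PySem.List.enumerate ((row1.zip row2).map fun p => pvBaseName p.1 p.2)).foldl
      (fun d q => if q.2 ≠ "" then d.modify q.2 [] (· ++ [q.1]) else d)
      (PySem.Dict.empty : PySem.Dict String (List Int))
      = pvPositions ((row1.zip row2).map fun p => pvBaseName p.1 p.2) := rfl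
  rw [hpos]
  rw [PySem.Dict.items_eq_map_keys _ (pvPositions_keys_nodup _) ([] : List Int)]
  rw [List.foldl_map]
  rfl

theorem pvRank_succ (bases : List String) (j : Nat) (hj : j < bases.length) :
    pvRank bases j = List.count (bases[j]) (bases.take j) + 1 := by
  have hgd : bases.getD j "" = bases[j] := by
    simp [List.getD_eq_getElem?_getD, List.getElem?_eq_getElem hj]
  rw [pvRank, hgd, List.take_add_one, List.count_append, List.getElem?_eq_getElem hj]
  simp

-- ===== VERDICT (by name: the statement is the Claim_ definition above) =====
theorem merge_two_header_rows_py_spec : Claim_equal_merge_two_header_rows_py := by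
  intro row1 row2 _
  show merge_two_header_rows_py row1 row2 = merge_two_header_rows_py_alt row1 row2
  rw [pvA_eq_fold_dstep, pvFold_dstep_eq_render _ [] PySem.Dict.empty []
    (by intro n _; simp [PySem.Dict.getD_empty]), List.nil_append, pvB_eq]
  set bases := (row1.zip row2).map (fun p => pvBaseName p.1 p.2) with hbases
  apply List.ext_getElem?
  intro j
  by_cases hj : j < bases.length
  · rw [pvApply_getElem? bases _ (pvPositions_keys_ne bases) bases rfl j hj]
    have hlhs : (pvRender [] bases)[j]? = some (pvF (bases.take j) (bases[j])) := by
      rw [List.getElem?_eq_getElem (by rw [pvRender_length]; exact hj)]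
      have := pvRender_getElem [] bases j hj
      rw [List.nil_append] at this
      rw [this]
    rw [hlhs]
    have hgd : bases.getD j "" = bases[j] := by
      simp [List.getD_eq_getElem?_getD, List.getElem?_eq_getElem hj]
    by_cases hn : bases[j] = ""
    · have hnot : bases.getD j "" ∉ (pvPositions bases).keys := by
        rw [hgd, hn]
        intro hcon
        exact pvPositions_keys_ne bases "" hcon rfl
      simp only [pvF, hn, if_true]
      rw [if_neg (fun hcon => hnot hcon.1), List.getElem?_eq_getElem hj, hn]
    · have hrk := pvRank_succ bases j hj
      by_cases hc : List.count (bases[j]) (bases.take j) = 0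
      · have h1 : pvRank bases j = 1 := by omega
        have hcond : ¬ (bases.getD j "" ∈ (pvPositions bases).keys ∧ 2 ≤ pvRank bases j) := by
          intro hcon; omega
        rw [if_neg hcond, List.getElem?_eq_getElem hj]
        simp only [pvF, hn, if_false, hc]
        norm_num
      · have h2 : 2 ≤ pvRank bases j := by omega
        have hmem : bases.getD j "" ∈ (pvPositions bases).keys := by
          rw [hgd]
          exact pvPositions_mem_keys bases _ hn (List.getElem_mem hj)
        rw [if_pos ⟨hmem, h2⟩]
        simp only [pvF, hn, if_false]
        have hgt : (List.count (bases[j]) (bases.take j) : Int) + 1 > 1 := by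
          have : 1 ≤ List.count (bases[j]) (bases.take j) := by omega
          omega
        rw [if_pos hgt, hgd]
        have : (List.count (bases[j]) (bases.take j) : Int) + 1 = (pvRank bases j : Int) := by
          rw [hrk]; push_cast; ring
        rw [this]
  · have h1 : (pvRender [] bases)[j]? = none := by
      rw [List.getElem?_eq_none]
      rw [pvRender_length]; omega
    have h2 : ((pvPositions bases).keys.foldl
        (fun out k => pvWrite out k ((pvPositions bases).getD k [])) bases)[j]? = none := by
      rw [List.getElem?_eq_none]
      rw [pvApply_length]; omega
    rw [h1, h2]
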